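-- pv_equiv track=rewrite | github.com/Aliuakbar/ProjectEuler | euler49.py | is_permut
-- ===== SOURCE A (Python) =====
-- def is_permut(x, y):
--     x = [int(i) for i in str(x)]
--     y = [int(i) for i in str(y)]
--     for digit in x:
--         if digit not in y:
--             return False
--         y.remove(digit)
--     return True
-- ===== SOURCE B (Python) =====
-- def is_permut(x, y):
--     xs = [int(i) for i in str(x)]
--     ys = [int(i) for i in str(y)]
--     return all(xs.count(d) <= ys.count(d) for d in set(xs))
-- ===== Notes on version B (the rewrite author's own statement) =====
-- stated objective: simpler
-- what changed: Replaces A's destructive scan-and-remove loop with an early return by a single digit-frequency comparison: for each distinct digit of x, compare its count in x with its count in y.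
import Mathlib
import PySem

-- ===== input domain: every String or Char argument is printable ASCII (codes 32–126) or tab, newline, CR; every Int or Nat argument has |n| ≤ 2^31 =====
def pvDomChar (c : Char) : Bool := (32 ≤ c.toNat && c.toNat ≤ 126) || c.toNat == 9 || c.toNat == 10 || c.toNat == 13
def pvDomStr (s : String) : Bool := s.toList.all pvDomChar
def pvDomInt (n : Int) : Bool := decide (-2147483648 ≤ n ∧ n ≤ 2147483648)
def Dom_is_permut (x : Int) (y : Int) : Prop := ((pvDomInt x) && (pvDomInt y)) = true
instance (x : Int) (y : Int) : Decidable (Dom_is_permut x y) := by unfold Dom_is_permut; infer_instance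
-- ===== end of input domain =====

-- B replaces A's destructive scan-and-remove loop by a per-distinct-digit count comparison (simpler, no mutation).

-- ===== PORT A =====
-- [int(i) for i in str(n)]; none = ValueError
def pvDigitsA? (n : Int) : Option (List Int) :=
  (PySem.Int.toStr n).toList.mapM (fun c => PySem.Int.ofStr? (String.ofList [c]))

-- 'for digit in x: if digit not in y: return False; y.remove(digit)' then 'return True'
def pvALoop : List Int → List Int → Bool
  | [], _ => true
  | d :: ds, ys =>
      if ys.contains d then pvALoop ds ((PySem.List.remove? ys d).getD ys)
      else false

def is_permut (x : Int) (y : Int) : Bool :=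
  match pvDigitsA? x, pvDigitsA? y with
  | some xs, some ys => pvALoop xs ys
  | _, _ => false      -- ValueError in Python; excluded by Pre_

-- ===== PORT B =====
-- [int(i) for i in str(n)]; none = ValueError
def pvDigitsB? (n : Int) : Option (List Int) :=
  (PySem.Int.toStr n).toList.mapM (fun c => PySem.Int.ofStr? (String.ofList [c]))

-- all(xs.count(d) <= ys.count(d) for d in set(xs))
def is_permut_alt (x : Int) (y : Int) : Bool :=
  -- none = ValueError in Python; excluded by Pre_
  ((pvDigitsB? x).bind fun xs => (pvDigitsB? y).map fun ys =>
      (PySem.Set.ofList xs).all (fun d => xs.count d ≤ ys.count d)).getD false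

-- ===== PRECONDITION & SPEC =====
-- Pre_ excludes negative arguments: str(x) then contains '-', on which int('-') raises ValueError in A (and in B).
def Pre_is_permut (x : Int) (y : Int) : Prop := 0 ≤ x ∧ 0 ≤ y
instance (x : Int) (y : Int) : Decidable (Pre_is_permut x y) := by unfold Pre_is_permut; infer_instance
def pvWitness_is_permut : Int × Int := (1487, 8147)

def Spec_is_permut (x : Int) (y : Int) (out : Bool) : Prop := out = is_permut_alt x y
instance (x : Int) (y : Int) (out : Bool) : Decidable (Spec_is_permut x y out) := by unfold Spec_is_permut; infer_instance

-- ===== CLAIM (what is proved, stated in full; the proofs are below) =====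
def Claim_equal_is_permut : Prop := ∀ (x : Int) (y : Int), Dom_is_permut x y → Pre_is_permut x y → Spec_is_permut x y (is_permut x y)

-- ===== LEMMAS AND PROOFS =====

-- A's loop succeeds exactly when x's digit multiset is contained in y's.
theorem pvALoop_iff (xs : List Int) : ∀ ys : List Int,
    pvALoop xs ys = true ↔ ∀ d : Int, xs.count d ≤ ys.count d := by
  induction xs with
  | nil => intro ys; simp [pvALoop]
  | cons d ds ih =>
    intro ys
    by_cases hmem : d ∈ ys
    · rw [pvALoop, if_pos (by simpa using hmem),
        PySem.List.remove?_eq_some_erase ys d hmem, Option.getD_some, ih]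
      have hd : 1 ≤ ys.count d := List.one_le_count_iff.mpr hmem
      constructor
      · intro h e
        have h1 := h e
        rw [List.count_erase] at h1
        rw [List.count_cons]
        simp only [beq_iff_eq] at h1 ⊢
        split_ifs at h1 ⊢ with hc
        · subst hc; omega
        · omega
      · intro h e
        have h1 := h e
        rw [List.count_cons] at h1
        rw [List.count_erase]
        simp only [beq_iff_eq] at h1 ⊢
        split_ifs at h1 ⊢ with hc
        · subst hc; omega
        · omega
    · rw [pvALoop, if_neg (by simpa using hmem)]
      simp only [Bool.false_eq_true, false_iff]
      intro h
      have h1 := h d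
      rw [List.count_cons_self] at h1
      exact hmem (List.one_le_count_iff.mp (by omega))

-- B's distinct-digit scan checks the same containment.
theorem pvAll_iff (xs ys : List Int) :
    (PySem.Set.ofList xs).all (fun d => xs.count d ≤ ys.count d) = true ↔
      ∀ d : Int, xs.count d ≤ ys.count d := by
  rw [List.all_eq_true]
  constructor
  · intro h d
    by_cases hd : d ∈ xs
    · simpa using h d ((PySem.Set.mem_ofList xs d).mpr hd)
    · simp [List.count_eq_zero_of_not_mem hd]
  · intro h d _
    simpa using h d

theorem is_permut_spec : Claim_equal_is_permut := by
  intro x y _ _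
  unfold Spec_is_permut is_permut is_permut_alt
  rw [show pvDigitsA? = pvDigitsB? from rfl]
  cases pvDigitsB? x with
  | none => rfl
  | some xs =>
    cases pvDigitsB? y with
    | none => rfl
    | some ys =>
      simp only [Option.bind_some, Option.map_some, Option.getD_some]
      rw [Bool.eq_iff_iff, pvALoop_iff, pvAll_iff]
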